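-- pv_equiv track=rewrite | github.com/trinhhuong244/Self-Driving-Car---20201 | fuzzy_base/draw_margin.py | getMarginLine
-- ===== SOURCE A (Python) =====
-- def checkStartEndPoint(x, listP):
--     count = 0
--     for point in listP:
--         if x in point:
--             count += 1
--     if count == 1:
--         return True
--     return False
--
-- def getMarginLine(startP, margin_Path):
--     lineP = []
--     previous = startP
--     lineP.append(previous)
--     while checkStartEndPoint(previous, margin_Path):
--         for path in margin_Path:
--             if previous in path:
--                 for point in path:
--                     if point != previous:
--                         previous = point
--                         lineP.append(previous)
--                         break
--                 margin_Path.remove(path)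
--                 break
--     return lineP
-- ===== SOURCE B (Python) =====
-- def getMarginLine(startP, margin_Path):
--     occ = {}
--     for i, path in enumerate(margin_Path):
--         for x in dict.fromkeys(path):
--             occ.setdefault(x, []).append(i)
--     alive = [True] * len(margin_Path)
--     lineP = [startP]
--     prev = startP
--     while True:
--         ids = [i for i in occ.get(prev, []) if alive[i]]
--         if len(ids) != 1:
--             return lineP
--         i = ids[0]
--         alive[i] = False
--         nxt = prev
--         for x in margin_Path[i]:
--             if x != prev:
--                 nxt = x
--                 break
--         if nxt != prev:
--             lineP.append(nxt)
--         prev = nxt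
-- ===== Notes on version B (the rewrite author's own statement) =====
-- stated objective: alternative
-- what changed: B builds a point-to-path-index dictionary once and walks the chain with a liveness mask, instead of A's per-step full rescans (membership count, linear search, list.remove) of the shrinking path list; B also does not mutate margin_Path.
import Mathlib
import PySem

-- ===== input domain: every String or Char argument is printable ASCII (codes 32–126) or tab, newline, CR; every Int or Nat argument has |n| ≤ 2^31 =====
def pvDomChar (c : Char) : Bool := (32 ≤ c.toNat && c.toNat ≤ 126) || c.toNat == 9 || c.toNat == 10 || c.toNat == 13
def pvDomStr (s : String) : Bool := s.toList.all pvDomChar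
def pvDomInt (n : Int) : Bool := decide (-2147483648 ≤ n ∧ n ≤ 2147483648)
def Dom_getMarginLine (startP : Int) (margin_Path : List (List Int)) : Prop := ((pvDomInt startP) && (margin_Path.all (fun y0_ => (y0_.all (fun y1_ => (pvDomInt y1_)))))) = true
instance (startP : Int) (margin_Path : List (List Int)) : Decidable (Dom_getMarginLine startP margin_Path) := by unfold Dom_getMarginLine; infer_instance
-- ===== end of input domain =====

-- B replaces A's per-step rescans of the whole path list (count + find + remove) by a point → path-index
-- dictionary built once plus a liveness mask, walking the chain without restructuring the list (objective:
-- alternative). Python A mutates margin_Path in place (removes the walked paths); B does not — the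
-- equivalence proved here is about the RETURN value only.

-- ===== PORT A =====
def checkStartEndPoint (x : Int) (listP : List (List Int)) : Bool :=
  decide ((listP.foldl (fun count point => if x ∈ point then count + 1 else count) (0 : Int)) = 1)

def getMarginLineLoop (lineP : List Int) (previous : Int) (paths : List (List Int)) : List Int :=
  if checkStartEndPoint previous paths then
    match hfind : paths.find? (fun path => decide (previous ∈ path)) with
    | some path =>
      -- inner 'for point in path: if point != previous: … break', then margin_Path.remove(path)
      (match path.find? (fun point => point != previous) with
       | some point => getMarginLineLoop (lineP ++ [point]) point ((PySem.List.remove? paths path).getD paths)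
       | none => getMarginLineLoop lineP previous ((PySem.List.remove? paths path).getD paths))
    | none => lineP  -- unreachable: check = true forces a path containing previous
  else lineP
termination_by paths.length
decreasing_by
  all_goals
  · have hmem : path ∈ paths := List.mem_of_find?_eq_some hfind
    rw [PySem.List.remove?_eq_some_erase paths path hmem]
    simp only [Option.getD_some]
    rw [List.length_erase_of_mem hmem]
    exact Nat.sub_lt (List.length_pos_of_mem hmem) one_pos

def getMarginLine (startP : Int) (margin_Path : List (List Int)) : List Int :=
  getMarginLineLoop [startP] startP margin_Path

-- ===== PORT B =====
-- occ: for each point, the indices (in order) of the paths containing it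
def pvBuildOcc (margin_Path : List (List Int)) : PySem.Dict Int (List Int) :=
  (PySem.List.enumerate margin_Path 0).foldl
    (fun occ ip => (PySem.List.dedup ip.2).foldl (fun d x => d.modify x [] (fun v => v ++ [ip.1])) occ)
    PySem.Dict.empty

-- termination helpers for the B-loop (cited in decreasing_by)
theorem pv_count_set_lt : ∀ (l : List Bool) (j : Nat), l[j]? = some true →
    (l.set j false).count true < l.count true := by
  intro l
  induction l with
  | nil => intro j h; simp at h
  | cons b t ih =>
    intro j h
    cases j with
    | zero => simp at h; subst h; simp
    | succ j => simp at h; have := ih j h; simp [List.count_cons]; omega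

theorem pv_count_pySetD_lt (alive : List Bool) (i : Int)
    (h : PySem.List.pyGetD alive i false = true) :
    (PySem.List.pySetD alive i false).count true < alive.count true := by
  cases hidx : PySem.List.pyIdx? alive.length i with
  | none => simp [PySem.List.pyGetD, PySem.List.pyGet?, hidx] at h
  | some j =>
    have hget : alive[j]? = some true := by
      simp only [PySem.List.pyGetD, PySem.List.pyGet?, hidx, Option.bind_some] at h
      cases hj : alive[j]? with
      | none => rw [hj] at h; simp at h
      | some b => rw [hj] at h; simp at h; rw [h]
    have hset : PySem.List.pySetD alive i false = alive.set j false := by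
      simp [PySem.List.pySetD, PySem.List.pySet?, hidx]
    rw [hset]
    exact pv_count_set_lt alive j hget

def pvWalk (margin_Path : List (List Int)) (occ : PySem.Dict Int (List Int))
    (alive : List Bool) (lineP : List Int) (prev : Int) : List Int :=
  match hids : (occ.getD prev []).filter (fun i => PySem.List.pyGetD alive i false) with
  | [i] =>
    let path := PySem.List.pyGetD margin_Path i []   -- margin_Path[i]; i always in range
    let nxt := (path.find? (fun x => x != prev)).getD prev
    pvWalk margin_Path occ (PySem.List.pySetD alive i false)
      (if nxt != prev then lineP ++ [nxt] else lineP) nxt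
  | _ => lineP
termination_by alive.count true
decreasing_by
  · have hi : PySem.List.pyGetD alive i false = true := by
      have : i ∈ (occ.getD prev []).filter (fun i => PySem.List.pyGetD alive i false) := by
        rw [hids]; simp
      exact (List.mem_filter.mp this).2
    exact pv_count_pySetD_lt alive i hi

def getMarginLine_alt (startP : Int) (margin_Path : List (List Int)) : List Int :=
  pvWalk margin_Path (pvBuildOcc margin_Path)
    (List.replicate margin_Path.length true) [startP] startP

-- ===== PRECONDITION & SPEC =====
def Spec_getMarginLine (startP : Int) (margin_Path : List (List Int)) (out : List Int) : Prop := out = getMarginLine_alt startP margin_Path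
instance (startP : Int) (margin_Path : List (List Int)) (out : List Int) : Decidable (Spec_getMarginLine startP margin_Path out) := by unfold Spec_getMarginLine; infer_instance

-- ===== CLAIM (what is proved, stated in full; the proofs are below) =====
def Claim_equal_getMarginLine : Prop := ∀ (startP : Int) (margin_Path : List (List Int)), Dom_getMarginLine startP margin_Path → Spec_getMarginLine startP margin_Path (getMarginLine startP margin_Path)

-- ===== LEMMAS AND PROOFS =====

-- unfolding lemmas for the two loops
theorem pvWalk_default (M : List (List Int)) (occ : PySem.Dict Int (List Int))
    (alive : List Bool) (lineP : List Int) (prev : Int)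
    (h : ∀ i, (occ.getD prev []).filter (fun i => PySem.List.pyGetD alive i false) ≠ [i]) :
    pvWalk M occ alive lineP prev = lineP := by
  rw [pvWalk]
  split
  · rename_i i hids; exact absurd hids (h i)
  · rfl

theorem pvWalk_one (M : List (List Int)) (occ : PySem.Dict Int (List Int))
    (alive : List Bool) (lineP : List Int) (prev : Int) (i : Int)
    (h : (occ.getD prev []).filter (fun i => PySem.List.pyGetD alive i false) = [i]) :
    pvWalk M occ alive lineP prev =
      pvWalk M occ (PySem.List.pySetD alive i false)
        (if ((PySem.List.pyGetD M i []).find? (fun x => x != prev)).getD prev != prev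
         then lineP ++ [((PySem.List.pyGetD M i []).find? (fun x => x != prev)).getD prev]
         else lineP)
        (((PySem.List.pyGetD M i []).find? (fun x => x != prev)).getD prev) := by
  rw [pvWalk]
  split
  · rename_i i' hids
    rw [h] at hids
    cases hids
    rfl
  · rename_i hne
    exact absurd h (hne i)

theorem pvLoopA_false (lineP : List Int) (previous : Int) (paths : List (List Int))
    (h : checkStartEndPoint previous paths = false) :
    getMarginLineLoop lineP previous paths = lineP := by
  rw [getMarginLineLoop, h]
  simp

theorem pvLoopA_step (lineP : List Int) (previous : Int) (paths : List (List Int)) (path : List Int)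
    (h : checkStartEndPoint previous paths = true)
    (hf : paths.find? (fun path => decide (previous ∈ path)) = some path) :
    getMarginLineLoop lineP previous paths =
      (match path.find? (fun point => point != previous) with
       | some point => getMarginLineLoop (lineP ++ [point]) point ((PySem.List.remove? paths path).getD paths)
       | none => getMarginLineLoop lineP previous ((PySem.List.remove? paths path).getD paths)) := by
  rw [getMarginLineLoop, h]
  simp only [if_true]
  split
  · rename_i p hfind
    rw [hf] at hfind
    cases hfind
    rfl
  · rename_i hnone
    rw [hf] at hnone
    cases hnone

theorem pvLoopA_step_some (lineP : List Int) (previous : Int) (paths : List (List Int))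
    (path : List Int) (point : Int)
    (h : checkStartEndPoint previous paths = true)
    (hf : paths.find? (fun path => decide (previous ∈ path)) = some path)
    (hfp : path.find? (fun point => point != previous) = some point) :
    getMarginLineLoop lineP previous paths
      = getMarginLineLoop (lineP ++ [point]) point ((PySem.List.remove? paths path).getD paths) := by
  rw [pvLoopA_step lineP previous paths path h hf, hfp]

theorem pvLoopA_step_none (lineP : List Int) (previous : Int) (paths : List (List Int))
    (path : List Int)
    (h : checkStartEndPoint previous paths = true)
    (hf : paths.find? (fun path => decide (previous ∈ path)) = some path)
    (hfp : path.find? (fun point => point != previous) = none) :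
    getMarginLineLoop lineP previous paths
      = getMarginLineLoop lineP previous ((PySem.List.remove? paths path).getD paths) := by
  rw [pvLoopA_step lineP previous paths path h hf, hfp]

-- characterisation of the index dictionary: occ[c] = indices of the paths containing c
theorem pv_occInner (p : List Int) (i : Int) (d : PySem.Dict Int (List Int)) (c : Int) :
    ((PySem.List.dedup p).foldl (fun d x => d.modify x [] (fun v => v ++ [i])) d).getD c []
      = d.getD c [] ++ (if c ∈ p then [i] else []) := by
  have h1 : (PySem.List.dedup p).foldl (fun d x => d.modify x [] (fun v => v ++ [i])) d
      = ((PySem.List.dedup p).map (fun x => (x, i))).foldl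
          (fun d q => d.modify q.1 [] (fun v => v ++ [q.2])) d := by
    rw [List.foldl_map]
  rw [h1, PySem.Dict.getD_foldl_modify_append]
  congr 1
  rw [List.filter_map]
  have h2 : (PySem.List.dedup p).filter ((fun q => q.1 == c) ∘ (fun x => (x, i)))
      = if c ∈ p then [c] else [] := by
    have : ((fun q => q.1 == c) ∘ (fun x : Int => (x, i))) = (fun x => x == c) := rfl
    rw [this, List.filter_beq]
    by_cases hc : c ∈ p
    · rw [List.count_eq_one_of_mem (PySem.List.nodup_dedup p) ((PySem.List.mem_dedup p c).mpr hc)]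
      simp [hc]
    · rw [List.count_eq_zero_of_not_mem (by rw [PySem.List.mem_dedup]; exact hc)]
      simp [hc]
  rw [h2]
  by_cases hc : c ∈ p <;> simp [hc]

theorem pv_occFold_getD (l : List (Int × List Int)) (d : PySem.Dict Int (List Int)) (c : Int) :
    ((l.foldl (fun occ ip => (PySem.List.dedup ip.2).foldl (fun d x => d.modify x [] (fun v => v ++ [ip.1])) occ) d).getD c [])
      = d.getD c [] ++ (l.filter (fun ip => decide (c ∈ ip.2))).map (·.1) := by
  induction l generalizing d with
  | nil => simp
  | cons ip t ih =>
    rw [List.foldl_cons, ih, pv_occInner, List.filter_cons]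
    by_cases hc : c ∈ ip.2 <;> simp [hc]

theorem pvBuildOcc_getD (M : List (List Int)) (c : Int) :
    (pvBuildOcc M).getD c [] = ((PySem.List.enumerate M 0).filter (fun ip => decide (c ∈ ip.2))).map (·.1) := by
  unfold pvBuildOcc
  rw [pv_occFold_getD]
  simp

theorem pv_check_eq (prev : Int) (paths : List (List Int)) :
    checkStartEndPoint prev paths = decide (paths.countP (fun p => decide (prev ∈ p)) = 1) := by
  unfold checkStartEndPoint
  have h : (fun (count : Int) (point : List Int) => if prev ∈ point then count + 1 else count)
      = (fun acc x => if (fun p => decide (prev ∈ p)) x = true then acc + 1 else acc) := by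
    funext acc x; simp
  rw [h, PySem.List.foldl_count_if]
  simp only [zero_add]
  exact decide_eq_decide.mpr (by exact_mod_cast Iff.rfl)

theorem pv_filter_eq_singleton {α : Type} (p : α → Bool) :
    ∀ (l : List α) (a : α), l.filter p = [a] →
      ∃ l₁ l₂, l = l₁ ++ a :: l₂ ∧ (∀ b ∈ l₁, p b = false) ∧ (∀ b ∈ l₂, p b = false) := by
  intro l
  induction l with
  | nil => intro a h; simp at h
  | cons x t ih =>
    intro a h
    rw [List.filter_cons] at h
    by_cases hx : p x = true
    · simp [hx] at h
      obtain ⟨hxa, ht⟩ := h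
      exact ⟨[], t, by simp [hxa], by simp, fun b hb => ht b hb⟩
    · simp [hx] at h
      obtain ⟨l₁, l₂, hl, h1, h2⟩ := ih a h
      exact ⟨x :: l₁, l₂, by simp [hl], by
        intro b hb
        rcases List.mem_cons.mp hb with hb | hb
        · subst hb; simpa using hx
        · exact h1 b hb, h2⟩

theorem pv_remove_middle (xs ys : List (List Int)) (a : List Int)
    (h : ∀ b ∈ xs, b ≠ a) :
    PySem.List.remove? (xs ++ a :: ys) a = some (xs ++ ys) := by
  induction xs with
  | nil => simp
  | cons x t ih =>
    rw [List.cons_append, PySem.List.remove?_cons_of_ne _ (h x (by simp)),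
      ih (fun b hb => h b (by simp [hb]))]
    simp

theorem pv_ids_eq (M : List (List Int)) (alive : List Bool) (prev : Int) :
    ((pvBuildOcc M).getD prev []).filter (fun i => PySem.List.pyGetD alive i false)
      = ((PySem.List.enumerate M 0).filter
          (fun a => PySem.List.pyGetD alive a.1 false && decide (prev ∈ a.2))).map (·.1) := by
  rw [pvBuildOcc_getD, List.filter_map, List.filter_filter]
  rfl

theorem pv_G_eq (M : List (List Int)) (alive : List Bool) (prev : Int) :
    ((PySem.List.enumerate M 0).filter (fun ip => PySem.List.pyGetD alive ip.1 false)).filter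
        (fun a => decide (prev ∈ a.2))
      = (PySem.List.enumerate M 0).filter
          (fun a => PySem.List.pyGetD alive a.1 false && decide (prev ∈ a.2)) := by
  rw [List.filter_filter]
  exact List.filter_congr (fun a _ => Bool.and_comm _ _)

theorem pv_countP_eq (M : List (List Int)) (alive : List Bool) (prev : Int) :
    (((PySem.List.enumerate M 0).filter (fun ip => PySem.List.pyGetD alive ip.1 false)).map (·.2)).countP
        (fun p => decide (prev ∈ p))
      = ((PySem.List.enumerate M 0).filter
          (fun a => PySem.List.pyGetD alive a.1 false && decide (prev ∈ a.2))).length := by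
  rw [List.countP_map, List.countP_eq_length_filter]
  have hcmp : ((fun p => decide (prev ∈ p)) ∘ (fun x : Int × List Int => x.2))
      = (fun a : Int × List Int => decide (prev ∈ a.2)) := rfl
  rw [hcmp, pv_G_eq]

-- main loop correspondence
theorem pv_loop_eq (M : List (List Int)) :
    ∀ (n : Nat) (alive : List Bool) (prev : Int) (lineP : List Int),
      alive.length = M.length →
      ((PySem.List.enumerate M 0).filter (fun ip => PySem.List.pyGetD alive ip.1 false)).length ≤ n →
      getMarginLineLoop lineP prev
          (((PySem.List.enumerate M 0).filter (fun ip => PySem.List.pyGetD alive ip.1 false)).map (·.2))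
        = pvWalk M (pvBuildOcc M) alive lineP prev := by
  intro n
  induction n with
  | zero =>
    intro alive prev lineP hlen hle
    have hkeep : (PySem.List.enumerate M 0).filter (fun ip => PySem.List.pyGetD alive ip.1 false) = [] :=
      List.length_eq_zero_iff.mp (Nat.le_zero.mp hle)
    rw [hkeep]
    rw [pvWalk_default]
    · rw [pvLoopA_false]
      rw [pv_check_eq]
      simp
    · intro i
      rw [pv_ids_eq]
      have : (PySem.List.enumerate M 0).filter
          (fun a => PySem.List.pyGetD alive a.1 false && decide (prev ∈ a.2)) = [] := by
        apply List.eq_nil_of_length_eq_zero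
        have hsub : ((PySem.List.enumerate M 0).filter
            (fun a => PySem.List.pyGetD alive a.1 false && decide (prev ∈ a.2))).Sublist
            ((PySem.List.enumerate M 0).filter (fun ip => PySem.List.pyGetD alive ip.1 false)) := by
          rw [← pv_G_eq]
          exact List.filter_sublist
        have := hsub.length_le
        omega
      rw [this]
      simp
  | succ n ih =>
    intro alive prev lineP hlen hle
    cases hG : (PySem.List.enumerate M 0).filter
        (fun a => PySem.List.pyGetD alive a.1 false && decide (prev ∈ a.2)) with
    | nil =>
      rw [pvWalk_default]
      · apply pvLoopA_false
        rw [pv_check_eq]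
        have hc := pv_countP_eq M alive prev
        rw [hG] at hc
        simp only [List.length_nil] at hc
        rw [hc]
        decide
      · intro i
        rw [pv_ids_eq, hG]
        simp
    | cons g gs =>
      cases gs with
      | cons g' t =>
        rw [pvWalk_default]
        · apply pvLoopA_false
          rw [pv_check_eq]
          have hc := pv_countP_eq M alive prev
          rw [hG] at hc
          simp only [List.length_cons] at hc
          rw [hc]
          exact decide_eq_false (by omega)
        · intro i
          rw [pv_ids_eq, hG]
          simp
      | nil =>
        -- G = [g] : exactly one remaining path contains prev
        have hKf : ((PySem.List.enumerate M 0).filter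
              (fun ip => PySem.List.pyGetD alive ip.1 false)).filter
              (fun a => decide (prev ∈ a.2)) = [g] := by
          rw [pv_G_eq, hG]
        have hgG : g ∈ (PySem.List.enumerate M 0).filter
            (fun a => PySem.List.pyGetD alive a.1 false && decide (prev ∈ a.2)) := by
          rw [hG]; exact List.mem_singleton.mpr rfl
        obtain ⟨hgE, hgpred⟩ := List.mem_filter.mp hgG
        obtain ⟨k, hk, hkeq⟩ := (PySem.List.mem_enumerate_iff M 0 g).mp hgE
        have hg1 : g.1 = (k : Int) := by rw [hkeq]; simp
        have hg2 : g.2 = M[k] := by rw [hkeq]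
        simp only [Bool.and_eq_true] at hgpred
        obtain ⟨halive, hprevmem⟩ := hgpred
        have hprev : prev ∈ g.2 := of_decide_eq_true hprevmem
        have hcheck : checkStartEndPoint prev
            (((PySem.List.enumerate M 0).filter
              (fun ip => PySem.List.pyGetD alive ip.1 false)).map (·.2)) = true := by
          rw [pv_check_eq, pv_countP_eq, hG]
          simp
        have hfind : ((((PySem.List.enumerate M 0).filter
              (fun ip => PySem.List.pyGetD alive ip.1 false)).map (·.2)).find?
              (fun p => decide (prev ∈ p))) = some g.2 := by
          rw [← List.head?_filter, List.filter_map]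
          have hcmp : ((fun p => decide (prev ∈ p)) ∘ (fun x : Int × List Int => x.2))
              = (fun a : Int × List Int => decide (prev ∈ a.2)) := rfl
          rw [hcmp, hKf]
          rfl
        obtain ⟨l₁, l₂, hkeep, h1, h2⟩ := pv_filter_eq_singleton _ _ _ hKf
        -- the removal result: the unique matching path dropped
        have hrem : ((PySem.List.remove?
              (((PySem.List.enumerate M 0).filter
                (fun ip => PySem.List.pyGetD alive ip.1 false)).map (·.2)) g.2).getD
              (((PySem.List.enumerate M 0).filter
                (fun ip => PySem.List.pyGetD alive ip.1 false)).map (·.2)))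
            = (l₁ ++ l₂).map (·.2) := by
          rw [hkeep]
          simp only [List.map_append, List.map_cons]
          rw [pv_remove_middle (l₁.map (·.2)) (l₂.map (·.2)) g.2 ?_]
          · simp
          · intro b hb heq
            obtain ⟨c, hc, hcb⟩ := List.mem_map.mp hb
            have : decide (prev ∈ c.2) = false := h1 c hc
            rw [hcb, heq] at this
            simp [hprev] at this
        -- the new liveness mask keeps exactly l₁ ++ l₂
        have hkeep' : (PySem.List.enumerate M 0).filter
            (fun ip => PySem.List.pyGetD (PySem.List.pySetD alive g.1 false) ip.1 false)
            = l₁ ++ l₂ := by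
          have hstep : ∀ ip ∈ PySem.List.enumerate M 0,
              PySem.List.pyGetD (PySem.List.pySetD alive g.1 false) ip.1 false
                = (!(ip.1 == (k : Int)) && PySem.List.pyGetD alive ip.1 false) := by
            intro ip hip
            obtain ⟨k', hk', hkeq'⟩ := (PySem.List.mem_enumerate_iff M 0 ip).mp hip
            have hip1 : ip.1 = (k' : Int) := by rw [hkeq']; simp
            rw [hg1, hip1,
              PySem.List.pyGetD_pySetD_natCast alive k k' false false (by rw [hlen]; exact hk)]
            by_cases hkk : k' = k
            · simp [hkk]
            · simp [hkk]
          rw [List.filter_congr hstep, ← List.filter_filter, hkeep]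
          have hpw : ((PySem.List.enumerate M 0).filter
              (fun ip => PySem.List.pyGetD alive ip.1 false)).Pairwise
              (fun p q : Int × List Int => p.1 < q.1) :=
            (PySem.List.pairwise_lt_enumerate M 0).sublist List.filter_sublist
          rw [hkeep] at hpw
          have hl₁ : ∀ b ∈ l₁, b.1 ≠ (k : Int) := by
            intro b hb
            have := (List.pairwise_append.mp hpw).2.2 b hb g (by simp)
            rw [hg1] at this
            omega
          have hl₂ : ∀ b ∈ l₂, b.1 ≠ (k : Int) := by
            intro b hb
            have := (List.pairwise_cons.mp (List.pairwise_append.mp hpw).2.1).1 b hb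
            rw [hg1] at this
            omega
          rw [List.filter_append, List.filter_cons]
          rw [List.filter_eq_self.mpr (fun b hb => by simp [hl₁ b hb]),
            List.filter_eq_self.mpr (fun b hb => by simp [hl₂ b hb])]
          rw [hg1]
          simp
        have hlen' : (PySem.List.pySetD alive g.1 false).length = M.length := by
          rw [PySem.List.length_pySetD, hlen]
        have hle' : ((PySem.List.enumerate M 0).filter
            (fun ip => PySem.List.pyGetD (PySem.List.pySetD alive g.1 false) ip.1 false)).length ≤ n := by
          rw [hkeep']
          have : ((PySem.List.enumerate M 0).filter
              (fun ip => PySem.List.pyGetD alive ip.1 false)).length ≤ n + 1 := hle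
          rw [hkeep] at this
          simp only [List.length_append, List.length_cons] at this ⊢
          omega
        have hids : ((pvBuildOcc M).getD prev []).filter
            (fun i => PySem.List.pyGetD alive i false) = [g.1] := by
          rw [pv_ids_eq, hG]
          rfl
        have hpathB : PySem.List.pyGetD M g.1 [] = g.2 := by
          rw [hg1, PySem.List.pyGetD_natCast, List.getD_eq_getElem M [] hk, hg2]
        cases hf : g.2.find? (fun x => x != prev) with
        | some point =>
          have hpt := List.find?_some hf
          rw [pvLoopA_step_some _ _ _ g.2 point hcheck hfind hf,
            pvWalk_one M (pvBuildOcc M) alive lineP prev g.1 hids, hpathB, hf]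
          simp only [Option.getD_some, hpt, if_true]
          rw [hrem, ← hkeep']
          exact ih (PySem.List.pySetD alive g.1 false) point (lineP ++ [point]) hlen' hle'
        | none =>
          rw [pvLoopA_step_none _ _ _ g.2 hcheck hfind hf,
            pvWalk_one M (pvBuildOcc M) alive lineP prev g.1 hids, hpathB, hf]
          simp only [Option.getD_none, bne_self_eq_false]
          rw [hrem, ← hkeep']
          exact ih (PySem.List.pySetD alive g.1 false) prev lineP hlen' hle' 

-- ===== VERDICT (by name: the statement is the Claim_ definition above) =====
theorem getMarginLine_spec : Claim_equal_getMarginLine := by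
  intro startP M _
  unfold Spec_getMarginLine getMarginLine getMarginLine_alt
  have hall : (PySem.List.enumerate M 0).filter
      (fun ip => PySem.List.pyGetD (List.replicate M.length true) ip.1 false)
      = PySem.List.enumerate M 0 := by
    apply List.filter_eq_self.mpr
    intro ip hip
    obtain ⟨k, hk, hkeq⟩ := (PySem.List.mem_enumerate_iff M 0 ip).mp hip
    subst hkeq
    simp only [zero_add, PySem.List.pyGetD_natCast]
    rw [List.getD_replicate _ (by simpa using hk)]
  have := pv_loop_eq M
      ((PySem.List.enumerate M 0).filter
        (fun ip => PySem.List.pyGetD (List.replicate M.length true) ip.1 false)).length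
      (List.replicate M.length true) startP [startP] (by simp) (le_refl _)
  rw [hall] at this
  rw [← this]
  congr 1
  exact (PySem.List.map_snd_enumerate M 0).symm
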